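-- pv_equiv track=rewrite | github.com/JYzzzzzz/PEAR-RTE | run.py | tag_to_label_pos
-- ===== SOURCE A (Python) =====
-- def tag_to_label_pos(list1, b_id, i_id, pos_list):
--     """
--     NER任务 从tag转换为实体在句中位置的过程 中的一步
--     example:
--         Args:
--             list1: [1, 9, 8, 8, 8, 8, 8, 8, 8, 8, 1, 1, 1,]
--             b_id: 9
--             i_id: 8
--             pos_list: pos_list + [1, 2, 3, 4, 5, 6, 7, 8, 9]
--         Returns: pos_list
--     可以找到多段
--     """
--     list11 = list1.copy()
--     list11.append(0)  # 哨兵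
--     if b_id not in list11:
--         return pos_list
--     while b_id in list11:
--         i = list11.index(b_id)
--         pos_list.append(i)
--         list11[i] = 0
--         i += 1
--         while list11[i] == i_id:
--             pos_list.append(i)
--             list11[i] = 0
--             i += 1
--     return pos_list
-- ===== SOURCE B (Python) =====
-- def tag_to_label_pos(list1, b_id, i_id, pos_list):
--     # Single left-to-right pass with a state flag (inside-a-span or not):
--     # a b_id opens a span; i_id tags extend the current span; anything else closes it.
--     in_span = False
--     for j, tag in enumerate(list1):
--         if tag == b_id:
--             pos_list.append(j)
--             in_span = True
--         elif in_span and tag == i_id: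
--             pos_list.append(j)
--         else:
--             in_span = False
--     return pos_list
-- ===== Notes on version B (the rewrite author's own statement) =====
-- stated objective: simpler
-- what changed: Replaces the repeated list.index/membership scans over a mutated sentinel-extended copy with a single left-to-right pass that keeps an in-span flag and appends positions as it goes.
import Mathlib
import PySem

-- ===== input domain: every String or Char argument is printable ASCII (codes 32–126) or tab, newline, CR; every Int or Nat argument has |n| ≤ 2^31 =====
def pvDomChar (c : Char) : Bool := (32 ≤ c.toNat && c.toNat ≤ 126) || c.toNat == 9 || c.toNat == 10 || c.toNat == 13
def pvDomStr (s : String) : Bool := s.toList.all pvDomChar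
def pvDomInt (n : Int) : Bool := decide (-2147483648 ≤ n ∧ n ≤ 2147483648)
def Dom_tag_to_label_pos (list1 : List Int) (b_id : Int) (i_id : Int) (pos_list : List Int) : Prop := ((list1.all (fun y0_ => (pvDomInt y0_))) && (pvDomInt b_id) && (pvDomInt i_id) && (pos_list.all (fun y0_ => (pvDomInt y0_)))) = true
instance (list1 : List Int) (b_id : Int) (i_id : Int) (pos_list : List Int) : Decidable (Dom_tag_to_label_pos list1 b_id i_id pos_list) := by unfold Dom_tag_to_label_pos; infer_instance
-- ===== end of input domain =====

-- B replaces A's repeated list.index / membership scans over a mutated copy by one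
-- left-to-right pass with an in-span flag (A mutates pos_list in place; B performs the
-- same append-to-pos_list mutation, and the equivalence proved here is about the return value).


-- ===== PORT A =====
-- inner 'while list11[i] == i_id' loop; fuel ≥ remaining length + 1 (it never runs out
-- at the call sites used inside Pre_); Python raises IndexError where pyGet? is none.
def innerA (i_id : Int) : Nat → List Int → Nat → List Int → (List Int × Nat × List Int)
  | 0, l, i, pos => (l, i, pos)
  | fuel+1, l, i, pos =>
    match PySem.List.pyGet? l (i : Int) with
    | some v =>
        if v = i_id then innerA i_id fuel (l.set i 0) (i+1) (pos ++ [(i : Int)])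
        else (l, i, pos)
    | none => (l, i, pos)

-- outer 'while b_id in list11' loop; each iteration zeroes the first b_id, so
-- fuel = (count of b_id) suffices whenever b_id ≠ 0 (inside Pre_).
def outerA (b_id i_id : Int) : Nat → List Int → List Int → List Int
  | 0, _, pos => pos
  | fuel+1, l, pos =>
    if b_id ∈ l then
      match PySem.List.index? l b_id with
      | some idx =>
          let l1 := l.set idx 0
          let r := innerA i_id (l1.length + 1) l1 (idx + 1) (pos ++ [(idx : Int)])
          outerA b_id i_id fuel r.1 r.2.2
      | none => pos
    else pos

def tag_to_label_pos (list1 : List Int) (b_id : Int) (i_id : Int) (pos_list : List Int) : List Int :=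
  let list11 := list1 ++ [0]          -- list11 = list1.copy(); list11.append(0)
  if b_id ∈ list11 then outerA b_id i_id (list11.count b_id) list11 pos_list
  else pos_list                        -- 'if b_id not in list11: return pos_list'

-- ===== PORT B =====
-- one pass over enumerate(list1) with state (pos_list so far, in_span flag)
def tag_to_label_pos_alt (list1 : List Int) (b_id : Int) (i_id : Int) (pos_list : List Int) : List Int :=
  ((PySem.List.enumerate list1 0).foldl
    (fun (s : List Int × Bool) jx =>
      if jx.2 = b_id then (s.1 ++ [jx.1], true)
      else if s.2 = true ∧ jx.2 = i_id then (s.1 ++ [jx.1], true)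
      else (s.1, false))
    (pos_list, false)).1

-- ===== PRECONDITION & SPEC =====
-- Pre_ excludes exactly the inputs on which the Python A never returns: with b_id = 0 the
-- outer loop re-finds the sentinel/overwritten zeros forever (or runs off the end), and with
-- i_id = 0 and the last nonzero tag equal to b_id the inner loop consumes the sentinel and
-- raises IndexError.  A returns normally on every input admitted here.
def Pre_tag_to_label_pos (list1 : List Int) (b_id : Int) (i_id : Int) (pos_list : List Int) : Prop :=
  b_id ≠ 0 ∧ ¬ (i_id = 0 ∧ (list1.reverse.dropWhile (fun x => x == 0)).head? = some b_id)
instance (list1 : List Int) (b_id : Int) (i_id : Int) (pos_list : List Int) : Decidable (Pre_tag_to_label_pos list1 b_id i_id pos_list) := by unfold Pre_tag_to_label_pos; infer_instance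

def pvWitness_tag_to_label_pos : List Int × Int × Int × List Int := ([1, 9, 8, 8, 1, 9, 8], 9, 8, [0])

def Spec_tag_to_label_pos (list1 : List Int) (b_id : Int) (i_id : Int) (pos_list : List Int) (out : List Int) : Prop := out = tag_to_label_pos_alt list1 b_id i_id pos_list
instance (list1 : List Int) (b_id : Int) (i_id : Int) (pos_list : List Int) (out : List Int) : Decidable (Spec_tag_to_label_pos list1 b_id i_id pos_list out) := by unfold Spec_tag_to_label_pos; infer_instance

-- ===== CLAIM (what is proved, stated in full; the proofs are below) =====
def Claim_equal_tag_to_label_pos : Prop := ∀ (list1 : List Int) (b_id : Int) (i_id : Int) (pos_list : List Int), Dom_tag_to_label_pos list1 b_id i_id pos_list → Pre_tag_to_label_pos list1 b_id i_id pos_list → Spec_tag_to_label_pos list1 b_id i_id pos_list (tag_to_label_pos list1 b_id i_id pos_list)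

-- ===== LEMMAS AND PROOFS =====

def goB (b_id i_id : Int) : List Int → Int → Bool → List Int
  | [], _, _ => []
  | x :: r, j, f =>
    if x = b_id then j :: goB b_id i_id r (j+1) true
    else if f = true ∧ x = i_id then j :: goB b_id i_id r (j+1) true
    else goB b_id i_id r (j+1) false

def endF (b_id i_id : Int) : List Int → Bool → Bool
  | [], f => f
  | x :: r, f =>
    if x = b_id then endF b_id i_id r true
    else if f = true ∧ x = i_id then endF b_id i_id r true
    else endF b_id i_id r false

def ramp (s k : Nat) : List Int := (List.range k).map (fun t => ((s + t : Nat) : Int))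

theorem ramp_succ (s k : Nat) : ramp s (k+1) = ((s : Int)) :: ramp (s+1) k := by
  simp [ramp, List.range_succ_eq_map, List.map_map, Function.comp_def]
  intro a _
  push_cast
  ring

theorem foldB_eq_goB (b_id i_id : Int) (l : List Int) (j : Int) (pos : List Int) (f : Bool) :
    (PySem.List.enumerate l j).foldl
      (fun (s : List Int × Bool) jx =>
        if jx.2 = b_id then (s.1 ++ [jx.1], true)
        else if s.2 = true ∧ jx.2 = i_id then (s.1 ++ [jx.1], true)
        else (s.1, false))
      (pos, f)
    = (pos ++ goB b_id i_id l j f, endF b_id i_id l f) := by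
  induction l generalizing j pos f with
  | nil => simp [PySem.List.enumerate_nil, goB, endF]
  | cons x r ih =>
    simp only [PySem.List.enumerate_cons, List.foldl_cons]
    by_cases h1 : x = b_id
    · simp [h1, goB, endF, ih]
    · by_cases h2 : f = true ∧ x = i_id
      · simp [h1, h2, goB, endF, ih]
      · simp [h1, h2, goB, endF, ih]

theorem goB_no_b (b_id i_id : Int) (l : List Int) (j : Int) (hb : b_id ∉ l) :
    goB b_id i_id l j false = [] := by
  induction l generalizing j with
  | nil => simp [goB]
  | cons x r ih =>
    simp only [List.mem_cons, not_or] at hb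
    simp [goB, Ne.symm hb.1, ih _ hb.2]

theorem goB_skip (b_id i_id : Int) (s1 rest : List Int) (j : Int) (hb : b_id ∉ s1) :
    goB b_id i_id (s1 ++ rest) j false = goB b_id i_id rest (j + s1.length) false := by
  induction s1 generalizing j with
  | nil => simp
  | cons x r ih =>
    simp only [List.mem_cons, not_or] at hb
    simp [goB, Ne.symm hb.1, ih _ hb.2]
    congr 1
    push_cast
    ring

def irange (j : Int) : Nat → List Int
  | 0 => []
  | k+1 => j :: irange (j+1) k

theorem ramp_eq_irange (s k : Nat) : ramp s k = irange (s : Int) k := by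
  induction k generalizing s with
  | zero => simp [ramp, irange]
  | succ k ih =>
    rw [ramp_succ, irange]
    rw [show ((s:Int) + 1) = ((s+1 : Nat) : Int) by push_cast; ring, ← ih]

theorem goB_run (b_id i_id : Int) (t rest : List Int) (j : Int) (ht : ∀ x ∈ t, x = i_id) :
    goB b_id i_id (t ++ rest) j true
      = irange j t.length ++ goB b_id i_id rest (j + t.length) true := by
  induction t generalizing j with
  | nil => simp [irange]
  | cons x r ih =>
    have hx : x = i_id := ht x (by simp)
    have hr : ∀ y ∈ r, y = i_id := fun y hy => ht y (by simp [hy])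
    have step : goB b_id i_id ((x :: r) ++ rest) j true
        = j :: goB b_id i_id (r ++ rest) (j+1) true := by
      by_cases hb : x = b_id
      · simp [goB, hb]
      · simp [goB, hb, hx]
    rw [step, ih _ hr]
    simp only [List.length_cons, irange, List.cons_append]
    congr 3
    push_cast
    ring

theorem goB_flag (b_id i_id : Int) (l : List Int) (j : Int)
    (h : ∀ x, l.head? = some x → x ≠ i_id) :
    goB b_id i_id l j true = goB b_id i_id l j false := by
  cases l with
  | nil => rfl
  | cons x r =>
    have hx : x ≠ i_id := h x rfl
    by_cases hb : x = b_id
    · simp [goB, hb]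
    · simp [goB, hb, hx]

theorem set_middle (pre : List Int) (x v : Int) (r : List Int) :
    (pre ++ x :: r).set pre.length v = pre ++ v :: r := by
  rw [List.set_append]
  simp

theorem innerA_spec (i_id : Int) (suf : List Int) : ∀ (pre pos : List Int) (fuel : Nat),
    suf.length < fuel →
    innerA i_id fuel (pre ++ suf) pre.length pos
      = (pre ++ List.replicate (suf.takeWhile (fun x => x == i_id)).length 0
             ++ suf.drop (suf.takeWhile (fun x => x == i_id)).length,
         pre.length + (suf.takeWhile (fun x => x == i_id)).length,
         pos ++ ramp pre.length (suf.takeWhile (fun x => x == i_id)).length) := by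
  induction suf with
  | nil =>
    intro pre pos fuel hf
    obtain ⟨f, rfl⟩ : ∃ f, fuel = f + 1 := ⟨fuel - 1, by omega⟩
    simp [innerA, PySem.List.pyGet?_natCast, ramp]
  | cons x r ih =>
    intro pre pos fuel hf
    obtain ⟨f, rfl⟩ : ∃ f, fuel = f + 1 := ⟨fuel - 1, by omega⟩
    rw [innerA]
    rw [PySem.List.pyGet?_append_length]
    dsimp only
    by_cases hx : x = i_id
    · rw [if_pos hx]
      rw [set_middle]
      have h0 : pre ++ (0:Int) :: r = (pre ++ [0]) ++ r := by simp
      have h1 : pre.length + 1 = (pre ++ [(0:Int)]).length := by simp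
      rw [h0, h1, ih (pre ++ [0]) (pos ++ [(pre.length : Int)]) f (by simp at hf ⊢; omega)]
      have htw : (x :: r).takeWhile (fun x => x == i_id) = x :: r.takeWhile (fun x => x == i_id) := by
        simp [List.takeWhile_cons, hx]
      rw [htw]
      
      refine Prod.ext ?_ (Prod.ext ?_ ?_)
      · simp [List.replicate_succ]
      · simp; omega
      · simp only [List.length_cons, List.length_append, List.length_singleton]
        rw [ramp_succ]
        simp
    · simp only [if_neg hx]
      simp [List.takeWhile_cons, hx, ramp]

theorem drop_takeWhile (p : Int → Bool) (l : List Int) :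
    l.drop (l.takeWhile p).length = l.dropWhile p := by
  induction l with
  | nil => simp
  | cons x r ih => by_cases hp : p x <;> simp [List.takeWhile_cons, List.dropWhile_cons, hp, ih]

theorem outer_no_b (b_id i_id : Int) (pre suf pos : List Int) (fuel : Nat)
    (hb0 : b_id ≠ 0) (hpre : b_id ∉ pre) (hsuf : b_id ∉ suf) :
    outerA b_id i_id fuel (pre ++ suf ++ [0]) pos = pos := by
  cases fuel with
  | zero => rfl
  | succ f =>
    rw [outerA, if_neg]
    simp [hpre, hsuf, hb0]

theorem outerA_spec (b_id i_id : Int) (hb0 : b_id ≠ 0) : ∀ (n : Nat) (suf pre pos : List Int) (fuel : Nat),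
    suf.length ≤ n → b_id ∉ pre → suf.count b_id ≤ fuel →
    (i_id = 0 → ((suf.reverse.dropWhile (fun x => x == 0)).head? ≠ some b_id)) →
    outerA b_id i_id fuel (pre ++ suf ++ [0]) pos
      = pos ++ goB b_id i_id suf (pre.length : Int) false := by
  intro n
  induction n with
  | zero =>
    intro suf pre pos fuel hn hpre hfuel hsafe
    have hsuf : suf = [] := List.length_eq_zero_iff.mp (by omega)
    subst hsuf
    rw [outer_no_b b_id i_id pre [] pos fuel hb0 hpre (by simp)]
    simp [goB]
  | succ m ih =>
    intro suf pre pos fuel hn hpre hfuel hsafe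
    by_cases hmem : b_id ∈ suf
    · -- b_id occurs: peel off the first span
      obtain ⟨k, hk⟩ := Option.isSome_iff_exists.mp ((PySem.List.index?_isSome_iff suf b_id).mpr hmem)
      obtain ⟨s1, s2, hsuf, hk1, hs1⟩ := (PySem.List.index?_eq_some_iff suf b_id k).mp hk
      subst hsuf
      have hcount : (s1 ++ b_id :: s2).count b_id = s2.count b_id + 1 := by
        simp [List.count_append, List.count_cons, List.count_eq_zero.mpr hs1]
      obtain ⟨f, rfl⟩ : ∃ f, fuel = f + 1 := ⟨fuel - 1, by omega⟩
      rw [outerA, if_pos (by simp)]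
      have hidx2 : PySem.List.index? (pre ++ (s1 ++ b_id :: s2) ++ [0]) b_id = some (pre ++ s1).length := by
        apply (PySem.List.index?_eq_some_iff _ _ _).mpr
        exact ⟨pre ++ s1, s2 ++ [0], by simp, rfl, by simp [hpre, hs1]⟩
      rw [hidx2]
      dsimp only
      have hset : (pre ++ (s1 ++ b_id :: s2) ++ [0]).set (pre ++ s1).length 0
          = ((pre ++ s1) ++ [0]) ++ (s2 ++ [0]) := by
        have h : pre ++ (s1 ++ b_id :: s2) ++ [0] = (pre ++ s1) ++ b_id :: (s2 ++ [0]) := by simp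
        rw [h, set_middle]
        simp
      rw [hset]
      have hplen : (pre ++ s1).length + 1 = ((pre ++ s1) ++ [(0:Int)]).length := by simp only [List.length_append, List.length_cons, List.length_nil]
      rw [hplen, innerA_spec i_id (s2 ++ [0]) ((pre ++ s1) ++ [0]) _ _ (by simp only [List.length_append, List.length_singleton, List.length_cons]; omega)]
      -- the takeWhile of the inner loop never reaches the sentinel
      set t := s2.takeWhile (fun x => x == i_id) with ht
      have hcrash : i_id = 0 → t.length ≠ s2.length := by
        intro h0 hfull
        have hall : ∀ x ∈ s2, x = 0 := by
          intro x hx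
          have heq : t = s2 := (List.takeWhile_prefix _).eq_of_length hfull
          rw [← heq, ht] at hx
          simpa [h0] using List.mem_takeWhile_imp hx
        apply hsafe h0
        have hrev : (s1 ++ b_id :: s2).reverse = s2.reverse ++ b_id :: s1.reverse := by simp
        rw [hrev, List.dropWhile_append, if_pos]
        · simp [List.dropWhile_cons, hb0]
        · simp only [List.isEmpty_iff, List.dropWhile_eq_nil_iff]
          intro x hx
          simp [hall x (List.mem_reverse.mp hx)]
      have htw : (s2 ++ [0]).takeWhile (fun x => x == i_id) = t := by
        rw [List.takeWhile_append]
        by_cases hfull : t.length = s2.length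
        · have h0 : i_id ≠ 0 := fun h => hcrash h hfull
          rw [if_pos (by rw [← ht]; exact hfull)]
          have heq : t = s2 := (List.takeWhile_prefix _).eq_of_length hfull
          simp [← ht, ← heq, Ne.symm h0]
        · rw [if_neg (by rw [← ht]; exact hfull)]
      rw [htw]
      have hk2le : t.length ≤ s2.length := (List.takeWhile_prefix _).length_le
      have hdrop : (s2 ++ [0]).drop t.length = s2.drop t.length ++ [0] :=
        List.drop_append_of_le_length hk2le
      rw [hdrop]
      set suf' := s2.dropWhile (fun x => x == i_id) with hsuf'
      have hdt : s2.drop t.length = suf' := drop_takeWhile _ _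
      rw [hdt]
      dsimp only
      have hhead : ∀ x, suf'.head? = some x → x ≠ i_id := by
        intro x hx
        have h := List.head?_dropWhile_not (fun z => z == i_id) s2
        rw [← hsuf', hx] at h
        simpa using h
      have hs2 : s2 = t ++ suf' := by
        rw [ht, hsuf']; exact List.takeWhile_append_dropWhile.symm
      have hLeq : pre ++ s1 ++ [0] ++ List.replicate t.length 0 ++ (suf' ++ [0])
          = (pre ++ s1 ++ [0] ++ List.replicate t.length 0) ++ suf' ++ [0] := by
        simp [List.append_assoc]
      rw [hLeq]
      have hs2len : s2.length = t.length + suf'.length := by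
        rw [hs2]; simp
      have hsl : suf'.length ≤ m := by
        have := hn; simp only [List.length_append, List.length_cons] at this; omega
      have hnp : b_id ∉ pre ++ s1 ++ [0] ++ List.replicate t.length 0 := by
        simp [hpre, hs1, hb0, List.mem_replicate]
      have hcf : suf'.count b_id ≤ f := by
        have h1 : suf'.count b_id ≤ s2.count b_id := by
          rw [← hdt]; exact (List.drop_sublist _ _).count_le _
        omega
      have hsf : i_id = 0 → (List.dropWhile (fun x => x == 0) suf'.reverse).head? ≠ some b_id := by
        intro h0
        have hne : suf' ≠ [] := by
          intro hnil
          have hlen : t.length = s2.length := by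
            rw [hs2len, hnil]; simp
          exact hcrash h0 hlen
        obtain ⟨y, ys, hys⟩ := List.exists_cons_of_ne_nil hne
        have hy0 : y ≠ (0:Int) := by
          have := hhead y (by rw [hys]; rfl)
          rw [h0] at this; exact this
        have hdw : List.dropWhile (fun x => x == (0:Int)) suf'.reverse ≠ [] := by
          rw [Ne, List.dropWhile_eq_nil_iff]
          push Not
          exact ⟨y, by simp [hys], by simp [hy0]⟩
        have hrev : (s1 ++ b_id :: s2).reverse = suf'.reverse ++ (t.reverse ++ (b_id :: s1.reverse)) := by
          rw [hs2]; simp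
        have happ : List.dropWhile (fun x => x == (0:Int)) (s1 ++ b_id :: s2).reverse
            = List.dropWhile (fun x => x == (0:Int)) suf'.reverse ++ (t.reverse ++ (b_id :: s1.reverse)) := by
          rw [hrev, List.dropWhile_append, if_neg (by simpa [List.isEmpty_iff] using hdw)]
        intro hcon
        apply hsafe h0
        rw [happ, List.head?_append, hcon]
        rfl
      rw [ih suf' (pre ++ s1 ++ [0] ++ List.replicate t.length 0) _ f hsl hnp hcf hsf]
      -- unfold the B side along the same span
      rw [goB_skip b_id i_id s1 _ _ hs1]
      rw [show goB b_id i_id (b_id :: s2) ((pre.length:Int) + (s1.length:Int)) false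
            = ((pre.length:Int) + (s1.length:Int))
                :: goB b_id i_id s2 ((pre.length:Int) + (s1.length:Int) + 1) true from by
        simp [goB]]
      rw [hs2, goB_run b_id i_id t suf' _ (fun x hx => by
        have hx' : x ∈ List.takeWhile (fun z => z == i_id) s2 := by rw [← ht]; exact hx
        have hbx := List.mem_takeWhile_imp hx'
        exact eq_of_beq hbx)]
      rw [goB_flag b_id i_id suf' _ hhead]
      rw [ramp_eq_irange]
      have e1 : (((pre ++ s1 ++ [0]).length : Nat) : Int) = (pre.length:Int) + (s1.length:Int) + 1 := by
        simp only [List.length_append, List.length_cons, List.length_nil]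
        push_cast; ring
      have e2 : (((pre ++ s1 ++ [0] ++ List.replicate t.length 0).length : Nat) : Int)
          = (pre.length:Int) + (s1.length:Int) + 1 + (t.length:Int) := by
        simp only [List.length_append, List.length_cons, List.length_nil, List.length_replicate]
        push_cast; ring
      have e3 : ((((pre ++ s1).length : Nat)) : Int) = (pre.length:Int) + (s1.length:Int) := by
        simp only [List.length_append]; push_cast; ring
      rw [e1, e2, e3]
      simp [List.append_assoc]
    · rw [outer_no_b b_id i_id pre suf pos fuel hb0 hpre hmem]
      rw [goB_no_b b_id i_id suf _ hmem]
      simp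


theorem tag_to_label_pos_spec : Claim_equal_tag_to_label_pos := by
  intro l b i p _ hpre
  obtain ⟨hb0, hsafe⟩ := hpre
  unfold Spec_tag_to_label_pos tag_to_label_pos tag_to_label_pos_alt
  dsimp only
  rw [foldB_eq_goB]
  by_cases hmem : b ∈ l ++ [0]
  · rw [if_pos hmem]
    have hsafe' : i = 0 → ((l.reverse.dropWhile (fun x => x == 0)).head? ≠ some b) :=
      fun h0 hc => hsafe ⟨h0, hc⟩
    have h := outerA_spec b i hb0 l.length l [] p ((l ++ [0]).count b) (le_refl _) (by simp)
      (by simp [List.count_append, List.count_singleton]) hsafe'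
    simpa using h
  · rw [if_neg hmem]
    have hbl : b ∉ l := fun h => hmem (by simp [h])
    rw [goB_no_b _ _ _ _ hbl]
    simp
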